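-- pv_equiv track=rewrite | github.com/uavkz/SwarMown | mainapp/to_refactor_services.py | extra_path_cycle
-- ===== SOURCE A (Python) =====
-- def extra_path_cycle(estim_pathes, given_drone_num, truck_path, drones, remainder, field, circles):
--     rem_init = remainder
--     for i in range(given_drone_num):  # for every drone in the field
--         path = []
--         path.append(truck_path[field])  # starts from 0
--         path.append([1])  # fly the path
--         if rem_init == 0:
--             path.append(truck_path[field + 1])
--         else:
--             for j in range(circles):
--                 path.append(truck_path[field])  # after flight goes to 0 j times
--                 if j != circles - 1:
--                     path.append([1])
--                 elif j == circles - 1 and remainder > 0: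
--                     path.append([1])
--                     remainder -= 1
--                 else:
--                     path.append(truck_path[field])
--             path.append(truck_path[field + 1])  # then goes to the next stop
--         drones[i].append(path)
--
--     return drones
-- ===== SOURCE B (Python) =====
-- def extra_path_cycle(estim_pathes, given_drone_num, truck_path, drones, remainder, field, circles):
--     n = given_drone_num
--     if n <= 0:
--         return drones
--     tp0, tp1 = truck_path[field], truck_path[field + 1]
--     if remainder != 0 and circles > 0:
--         head = [tp0, [1]] * circles
--         hi = head + [tp0, [1], tp1]
--         lo = head + [tp0, tp0, tp1]
--     else:
--         hi = lo = [tp0, [1], tp1]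
--     k = min(max(remainder, 0), n)
--     paths = [hi] * k + [lo] * (n - k)
--     for d, p in zip(drones, paths):
--         d.append(p)
--     return drones
-- ===== Notes on version B (the rewrite author's own statement) =====
-- stated objective: alternative
-- what changed: B replaces A's per-drone inner circle loop and threaded remainder counter by a staged construction: it builds the only two possible per-drone paths once by list multiplication, lays out the whole per-drone schedule as [hi]*k + [lo]*(n-k) with k = min(max(remainder,0), n), and zips that schedule onto the drones.
import Mathlib
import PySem

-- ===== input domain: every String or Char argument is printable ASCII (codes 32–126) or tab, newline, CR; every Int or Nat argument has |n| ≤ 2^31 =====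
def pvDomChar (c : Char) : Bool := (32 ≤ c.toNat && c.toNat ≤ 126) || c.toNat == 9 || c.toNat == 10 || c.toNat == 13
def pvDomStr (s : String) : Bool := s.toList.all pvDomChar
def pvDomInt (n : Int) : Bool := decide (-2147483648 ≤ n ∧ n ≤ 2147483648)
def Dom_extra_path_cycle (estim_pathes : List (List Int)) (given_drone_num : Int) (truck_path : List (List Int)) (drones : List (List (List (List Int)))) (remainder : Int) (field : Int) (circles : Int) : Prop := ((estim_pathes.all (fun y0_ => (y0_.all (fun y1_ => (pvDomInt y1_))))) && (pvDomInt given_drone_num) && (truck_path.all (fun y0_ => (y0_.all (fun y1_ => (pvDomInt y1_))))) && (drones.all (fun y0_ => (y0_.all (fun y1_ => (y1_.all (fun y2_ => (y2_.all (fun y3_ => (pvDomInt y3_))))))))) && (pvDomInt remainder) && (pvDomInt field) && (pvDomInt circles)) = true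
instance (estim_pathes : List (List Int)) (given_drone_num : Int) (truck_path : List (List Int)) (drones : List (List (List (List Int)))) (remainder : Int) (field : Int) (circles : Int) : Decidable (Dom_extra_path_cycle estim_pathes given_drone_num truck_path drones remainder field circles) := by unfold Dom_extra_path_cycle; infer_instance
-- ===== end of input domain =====

-- B builds the two possible per-drone paths ONCE by list arithmetic, lays out the whole `paths`
-- schedule up front and zips it onto `drones`, instead of A's per-drone inner loop with a threaded
-- counter; equivalence is about the RETURN value (both append to the caller's `drones` in Python).

-- ===== PORT A =====
-- body of A's inner circle loop (state: (path, remainder))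
def epcA_circle (truck_path : List (List Int)) (field circles : Int)
    (pr : List (List Int) × Int) (j : Int) : List (List Int) × Int :=
  let p := pr.1 ++ [PySem.List.pyGetD truck_path field []]          -- exact under Pre_ (index in range)
  if j ≠ circles - 1 then (p ++ [[1]], pr.2)
  else if j = circles - 1 ∧ pr.2 > 0 then (p ++ [[1]], pr.2 - 1)
  else (p ++ [PySem.List.pyGetD truck_path field []], pr.2)

-- body of A's per-drone loop iteration (state: (drones, remainder))
def epcA_step (truck_path : List (List Int)) (rem_init field circles : Int)
    (st : List (List (List (List Int))) × Int) (i : Int) :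
    List (List (List (List Int))) × Int :=
  let path : List (List Int) := []
  let path := path ++ [PySem.List.pyGetD truck_path field []]
  let path := path ++ [[1]]
  let pr :=
    if rem_init = 0 then
      (path ++ [PySem.List.pyGetD truck_path (field + 1) []], st.2)
    else
      let pr := (PySem.List.pyRange 0 circles 1).foldl
        (epcA_circle truck_path field circles) (path, st.2)
      (pr.1 ++ [PySem.List.pyGetD truck_path (field + 1) []], pr.2)
  (PySem.List.pySetD st.1 i (PySem.List.pyGetD st.1 i [] ++ [pr.1]), pr.2)  -- drones[i].append(path); exact under Pre_

def extra_path_cycle (estim_pathes : List (List Int)) (given_drone_num : Int) (truck_path : List (List Int)) (drones : List (List (List (List Int)))) (remainder : Int) (field : Int) (circles : Int) : List (List (List (List Int))) :=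
  let rem_init := remainder
  ((PySem.List.pyRange 0 given_drone_num 1).foldl
      (epcA_step truck_path rem_init field circles) (drones, remainder)).1

-- ===== PORT B =====
def extra_path_cycle_alt (estim_pathes : List (List Int)) (given_drone_num : Int) (truck_path : List (List Int)) (drones : List (List (List (List Int)))) (remainder : Int) (field : Int) (circles : Int) : List (List (List (List Int))) :=
  if given_drone_num ≤ 0 then drones
  else
    let tp0 := PySem.List.pyGetD truck_path field []          -- exact under Pre_
    let tp1 := PySem.List.pyGetD truck_path (field + 1) []
    let hilo :=
      if remainder ≠ 0 ∧ 0 < circles then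
        let head := PySem.List.pyRepeat [tp0, [1]] circles
        (head ++ [tp0, [1], tp1], head ++ [tp0, tp0, tp1])
      else
        ([tp0, [1], tp1], [tp0, [1], tp1])
    let k := min (max remainder 0) given_drone_num
    let paths := PySem.List.pyRepeat [hilo.1] k ++ PySem.List.pyRepeat [hilo.2] (given_drone_num - k)
    -- `for d, p in zip(drones, paths): d.append(p); return drones` on the return value:
    -- the zipped prefix gets its path appended, the drones beyond `paths` are untouched
    (drones.zip paths).map (fun dp => dp.1 ++ [dp.2]) ++ drones.drop paths.length

-- ===== PRECONDITION & SPEC =====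
-- Pre_ excludes exactly the inputs where A raises IndexError: when at least one drone is processed,
-- truck_path[field] and truck_path[field+1] must exist and drones must have given_drone_num entries.
def Pre_extra_path_cycle (estim_pathes : List (List Int)) (given_drone_num : Int) (truck_path : List (List Int)) (drones : List (List (List (List Int)))) (remainder : Int) (field : Int) (circles : Int) : Prop :=
  0 < given_drone_num →
    (given_drone_num ≤ (drones.length : Int) ∧
     PySem.Raise.InRange truck_path.length field ∧
     PySem.Raise.InRange truck_path.length (field + 1))
instance (estim_pathes : List (List Int)) (given_drone_num : Int) (truck_path : List (List Int)) (drones : List (List (List (List Int)))) (remainder : Int) (field : Int) (circles : Int) : Decidable (Pre_extra_path_cycle estim_pathes given_drone_num truck_path drones remainder field circles) := by unfold Pre_extra_path_cycle; infer_instance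

def pvWitness_extra_path_cycle : List (List Int) × Int × List (List Int) × List (List (List (List Int))) × Int × Int × Int :=
  ([], 2, [[0], [5], [9]], [[], []], 3, 0, 2)

def Spec_extra_path_cycle (estim_pathes : List (List Int)) (given_drone_num : Int) (truck_path : List (List Int)) (drones : List (List (List (List Int)))) (remainder : Int) (field : Int) (circles : Int) (out : List (List (List (List Int)))) : Prop := out = extra_path_cycle_alt estim_pathes given_drone_num truck_path drones remainder field circles
instance (estim_pathes : List (List Int)) (given_drone_num : Int) (truck_path : List (List Int)) (drones : List (List (List (List Int)))) (remainder : Int) (field : Int) (circles : Int) (out : List (List (List (List Int)))) : Decidable (Spec_extra_path_cycle estim_pathes given_drone_num truck_path drones remainder field circles out) := by unfold Spec_extra_path_cycle; infer_instance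

-- ===== CLAIM (what is proved, stated in full; the proofs are below) =====
def Claim_equal_extra_path_cycle : Prop := ∀ (estim_pathes : List (List Int)) (given_drone_num : Int) (truck_path : List (List Int)) (drones : List (List (List (List Int)))) (remainder : Int) (field : Int) (circles : Int), Dom_extra_path_cycle estim_pathes given_drone_num truck_path drones remainder field circles → Pre_extra_path_cycle estim_pathes given_drone_num truck_path drones remainder field circles → Spec_extra_path_cycle estim_pathes given_drone_num truck_path drones remainder field circles (extra_path_cycle estim_pathes given_drone_num truck_path drones remainder field circles)

-- ===== LEMMAS AND PROOFS =====

-- the path drone i receives (B's two prototypes, selected by i < remainder)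
def pathOf (tp0 tp1 : List Int) (remainder circles i : Int) : List (List Int) :=
  if remainder ≠ 0 ∧ 0 < circles then
    PySem.List.pyRepeat [tp0, [1]] circles ++ [tp0, if i < remainder then [1] else tp0, tp1]
  else [tp0, [1], tp1]

-- the value of A's `remainder` at the start of drone-iteration a (a ≥ 0)
def remAt (remainder circles a : Int) : Int :=
  if 0 < remainder ∧ 0 < circles then remainder - min a remainder else remainder

theorem epcA_circle_ne (truck_path : List (List Int)) (field circles : Int)
    (pr : List (List Int) × Int) (j : Int) (h : j ≠ circles - 1) :
    epcA_circle truck_path field circles pr j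
      = (pr.1 ++ [PySem.List.pyGetD truck_path field [], [1]], pr.2) := by
  simp [epcA_circle, h]

theorem epcA_circle_last (truck_path : List (List Int)) (field circles : Int)
    (pr : List (List Int) × Int) :
    epcA_circle truck_path field circles pr (circles - 1)
      = (pr.1 ++ [PySem.List.pyGetD truck_path field [],
            if 0 < pr.2 then [1] else PySem.List.pyGetD truck_path field []],
         if 0 < pr.2 then pr.2 - 1 else pr.2) := by
  by_cases hr : 0 < pr.2
  · simp [epcA_circle, hr]
  · simp [epcA_circle, hr]

-- A's inner circle loop, closed form (circles ≥ 1)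
theorem epcA_inner (truck_path : List (List Int)) (field circles : Int) (hc : 0 < circles)
    (p0 : List (List Int)) (rem : Int) :
    (PySem.List.pyRange 0 circles 1).foldl (epcA_circle truck_path field circles) (p0, rem)
    = (p0 ++ (PySem.List.pyRange 0 (circles - 1) 1).flatMap
          (fun _ => [PySem.List.pyGetD truck_path field [], [1]])
        ++ [PySem.List.pyGetD truck_path field [],
            if 0 < rem then [1] else PySem.List.pyGetD truck_path field []],
       if 0 < rem then rem - 1 else rem) := by
  rw [PySem.List.pyRange_one_append 0 (circles - 1) circles (by omega) (by omega)]
  rw [List.foldl_append]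
  have hpre : ∀ (L : List Int), (∀ j ∈ L, j ≠ circles - 1) → ∀ (pr : List (List Int) × Int),
      L.foldl (epcA_circle truck_path field circles) pr
      = (pr.1 ++ L.flatMap (fun _ => [PySem.List.pyGetD truck_path field [], [1]]), pr.2) := by
    intro L
    induction L with
    | nil => intro _ pr; simp
    | cons x xs ih =>
      intro hmem pr
      rw [List.foldl_cons, epcA_circle_ne _ _ _ _ _ (hmem x (by simp)),
        ih (fun j hj => hmem j (List.mem_cons_of_mem _ hj))]
      simp
  have hmem : ∀ j ∈ PySem.List.pyRange 0 (circles - 1) 1, j ≠ circles - 1 := by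
    intro j hj
    rw [PySem.List.mem_pyRange_one] at hj
    omega
  have hlast : PySem.List.pyRange (circles - 1) circles 1 = [circles - 1] := by
    have := PySem.List.pyRange_one_singleton (a := circles - 1)
    simpa using this
  rw [hlast, List.foldl_cons, List.foldl_nil, epcA_circle_last,
    hpre (PySem.List.pyRange 0 (circles - 1) 1) hmem (p0, rem)]

theorem flatMap_const {α β : Type} (l : List α) (L : List β) :
    l.flatMap (fun _ => L) = (List.replicate l.length L).flatten := by
  induction l with
  | nil => simp
  | cons x xs ih => simp [ih, List.replicate_succ]

-- the prefix A accumulates over the circles is exactly B's `[tp0,[1]] * circles`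
theorem repeat_shape (x y : List Int) (circles : Int) (hc : 0 < circles)
    (rest : List (List Int)) :
    x :: y :: ((PySem.List.pyRange 0 (circles - 1) 1).flatMap (fun _ => [x, y]) ++ rest)
      = PySem.List.pyRepeat [x, y] circles ++ rest := by
  rw [flatMap_const, PySem.List.pyRepeat]
  rw [PySem.List.length_pyRange_one]
  have h : circles.toNat = (circles - 1 - 0).toNat + 1 := by omega
  rw [h, List.replicate_succ, List.flatten_cons]
  simp

-- one drone step of A, with remainder = remAt, is "append pathOf i at index i"
theorem step_eq (truck_path : List (List Int)) (remainder field circles : Int)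
    (a : Int) (ha : 0 ≤ a) (ds : List (List (List (List Int)))) :
    epcA_step truck_path remainder field circles (ds, remAt remainder circles a) a
    = (PySem.List.pySetD ds a (PySem.List.pyGetD ds a [] ++
        [pathOf (PySem.List.pyGetD truck_path field [])
          (PySem.List.pyGetD truck_path (field + 1) []) remainder circles a]),
       remAt remainder circles (a + 1)) := by
  by_cases h0 : remainder = 0
  · subst h0
    simp [epcA_step, pathOf, remAt]
  · by_cases hc : 0 < circles
    · by_cases hl : a < remainder
      · have h1 : 0 < remAt remainder circles a := by unfold remAt; split_ifs with h <;> omega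
        have h2 : remAt remainder circles a - 1 = remAt remainder circles (a + 1) := by
          unfold remAt; split_ifs with h <;> omega
        simp only [epcA_step, epcA_inner truck_path field circles hc, pathOf, h0, hc, hl,
          if_pos h1, and_true, if_true, h2]
        simp [← repeat_shape _ _ circles hc, h0]
      · have h1 : ¬ 0 < remAt remainder circles a := by unfold remAt; split_ifs with h <;> omega
        have h2 : remAt remainder circles a = remAt remainder circles (a + 1) := by
          unfold remAt; split_ifs with h <;> omega
        simp only [epcA_step, epcA_inner truck_path field circles hc, pathOf, h0, hc, hl,
          if_neg h1, and_true, ← h2]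
        simp [← repeat_shape _ _ circles hc, h0]
    · have hnil : PySem.List.pyRange 0 circles 1 = [] :=
        PySem.List.pyRange_one_eq_nil (by omega)
      have hrem : remAt remainder circles a = remAt remainder circles (a + 1) := by
        unfold remAt; split_ifs with h <;> omega
      simp [epcA_step, pathOf, h0, hc, hnil, ← hrem]

-- out-of-range pySetD is the identity
theorem pySetD_out {α : Type} (xs : List α) (i : Int) (h : (xs.length : Int) ≤ i) (v : α) :
    PySem.List.pySetD xs i v = xs := by
  simp only [PySem.List.pySetD, PySem.List.pySet?, PySem.List.pyIdx?]
  split_ifs with h1 h2 h3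
  · exact absurd h2 (by omega)
  · simp
  · exact absurd h (by omega)
  · simp

theorem foldl_out {γ : Type} (f : Int → γ) (L : List Int) (ds : List (List γ))
    (h : ∀ i ∈ L, (ds.length : Int) ≤ i) :
    L.foldl (fun ds i => PySem.List.pySetD ds i (PySem.List.pyGetD ds i [] ++ [f i])) ds = ds := by
  induction L with
  | nil => rfl
  | cons x xs ih =>
    rw [List.foldl_cons, pySetD_out _ _ (h x (by simp)) _]
    exact ih (fun i hi => h i (List.mem_cons_of_mem _ hi))

-- the index-based "append pathOf i at i" loop is zip-with-paths on the untouched suffix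
theorem idx_loop {γ : Type} (f : Int → γ) (n : Int) :
    ∀ (rest pre : List (List γ)),
    (PySem.List.pyRange (pre.length : Int) n 1).foldl
      (fun ds i => PySem.List.pySetD ds i (PySem.List.pyGetD ds i [] ++ [f i])) (pre ++ rest)
    = pre ++ ((rest.zip ((PySem.List.pyRange (pre.length : Int) n 1).map f)).map
        (fun dp => dp.1 ++ [dp.2]) ++ rest.drop (n - pre.length).toNat) := by
  intro rest
  induction rest with
  | nil =>
    intro pre
    rw [foldl_out]
    · simp
    · intro i hi
      rw [PySem.List.mem_pyRange_one] at hi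
      simp
      omega
  | cons d rest ih =>
    intro pre
    by_cases hn : n ≤ (pre.length : Int)
    · rw [PySem.List.pyRange_one_eq_nil hn]
      have : (n - (pre.length : Int)).toNat = 0 := by omega
      simp [this]
    · rw [PySem.List.pyRange_one_cons (by omega)]
      simp only [List.foldl_cons]
      have hget : PySem.List.pyGetD (pre ++ d :: rest) (pre.length : Int) [] = d := by
        rw [PySem.List.pyGetD_natCast]
        simp [List.getD]
      have hset : PySem.List.pySetD (pre ++ d :: rest) (pre.length : Int) (d ++ [f pre.length])
          = (pre ++ [d ++ [f pre.length]]) ++ rest := by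
        rw [PySem.List.pySetD_natCast, List.set_append]
        simp
      rw [hget, hset]
      have hlen : ((pre ++ [d ++ [f pre.length]]).length : Int) = (pre.length : Int) + 1 := by
        simp
      have := ih (pre ++ [d ++ [f pre.length]])
      rw [hlen] at this
      rw [this]
      have hdrop : (n - (pre.length : Int)).toNat = (n - ((pre.length : Int) + 1)).toNat + 1 := by
        omega
      simp [hdrop, List.append_assoc]

-- the two loops over drones a, a+1, …, n-1 agree
theorem loop_eq (truck_path : List (List Int)) (remainder field circles n : Int) :
    ∀ (k : Nat) (a : Int), 0 ≤ a → (n - a).toNat = k →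
    ∀ (ds : List (List (List (List Int)))),
    ((PySem.List.pyRange a n 1).foldl (epcA_step truck_path remainder field circles)
        (ds, remAt remainder circles a)).1
    = (PySem.List.pyRange a n 1).foldl
        (fun ds i => PySem.List.pySetD ds i (PySem.List.pyGetD ds i [] ++
          [pathOf (PySem.List.pyGetD truck_path field [])
            (PySem.List.pyGetD truck_path (field + 1) []) remainder circles i])) ds := by
  intro k
  induction k with
  | zero =>
    intro a ha hk ds
    rw [PySem.List.pyRange_one_eq_nil (by omega)]
    simp
  | succ m ih =>
    intro a ha hk ds
    rw [PySem.List.pyRange_one_cons (by omega)]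
    simp only [List.foldl_cons]
    rw [step_eq truck_path remainder field circles a ha ds]
    exact ih (a + 1) (by omega) (by omega) _

-- a range maps to a constant list
theorem mapConst {γ : Type} (a b : Int) (f : Int → γ) (c : γ)
    (h : ∀ i ∈ PySem.List.pyRange a b 1, f i = c) :
    (PySem.List.pyRange a b 1).map f = List.replicate (b - a).toNat c := by
  rw [List.eq_replicate_iff]
  constructor
  · rw [List.length_map, PySem.List.length_pyRange_one]
  · intro x hx
    rw [List.mem_map] at hx
    obtain ⟨i, hi, rfl⟩ := hx
    exact h i hi

-- the per-index path schedule is B's `[hi]*k + [lo]*(n-k)` (k = min(max(remainder,0), n))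
theorem paths_eq_pos (tp0 tp1 : List Int) (remainder circles n : Int)
    (hr0 : remainder ≠ 0) (hcp : 0 < circles) :
    (PySem.List.pyRange 0 n 1).map (pathOf tp0 tp1 remainder circles)
    = List.replicate (min (max remainder 0) n).toNat
        (PySem.List.pyRepeat [tp0, [1]] circles ++ [tp0, [1], tp1])
      ++ List.replicate (n - min (max remainder 0) n).toNat
        (PySem.List.pyRepeat [tp0, [1]] circles ++ [tp0, tp0, tp1]) := by
  by_cases hn : 0 < n
  · rw [PySem.List.pyRange_one_append 0 (min (max remainder 0) n) n (by omega) (by omega),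
      List.map_append]
    rw [mapConst 0 (min (max remainder 0) n) _
        (PySem.List.pyRepeat [tp0, [1]] circles ++ [tp0, [1], tp1]) ?_,
      mapConst (min (max remainder 0) n) n _
        (PySem.List.pyRepeat [tp0, [1]] circles ++ [tp0, tp0, tp1]) ?_]
    · rw [show min (max remainder 0) n - 0 = min (max remainder 0) n from by ring]
    · intro i hi
      rw [PySem.List.mem_pyRange_one] at hi
      simp [pathOf, hr0, hcp, show ¬ i < remainder from by omega]
    · intro i hi
      rw [PySem.List.mem_pyRange_one] at hi
      simp [pathOf, hr0, hcp, show i < remainder from by omega]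
  · rw [PySem.List.pyRange_one_eq_nil (by omega)]
    have h1 : (min (max remainder 0) n).toNat = 0 := by omega
    have h2 : (n - min (max remainder 0) n).toNat = 0 := by omega
    simp [h1, h2]

theorem paths_eq_neg (tp0 tp1 : List Int) (remainder circles n : Int) (hn : 0 < n)
    (hrc : ¬ (remainder ≠ 0 ∧ 0 < circles)) :
    (PySem.List.pyRange 0 n 1).map (pathOf tp0 tp1 remainder circles)
    = List.replicate (min (max remainder 0) n).toNat ([tp0, [1], tp1])
      ++ List.replicate (n - min (max remainder 0) n).toNat ([tp0, [1], tp1]) := by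
  rw [mapConst 0 n _ ([tp0, [1], tp1]) (by intro i _; simp [pathOf, hrc])]
  rw [show (n - 0).toNat = (min (max remainder 0) n).toNat
      + (n - min (max remainder 0) n).toNat from by omega,
    List.replicate_add]

-- ===== VERDICT (by name: the statement is the Claim_ definition above) =====
theorem extra_path_cycle_spec : Claim_equal_extra_path_cycle := by
  unfold Claim_equal_extra_path_cycle
  intro estim_pathes given_drone_num truck_path drones remainder field circles _ _
  unfold Spec_extra_path_cycle extra_path_cycle extra_path_cycle_alt
  by_cases hn : given_drone_num ≤ 0
  · rw [if_pos hn, PySem.List.pyRange_one_eq_nil (by omega)]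
    simp
  · rw [if_neg hn]
    have h0 : remAt remainder circles 0 = remainder := by
      unfold remAt; split_ifs with h <;> omega
    have hA := loop_eq truck_path remainder field circles given_drone_num
      (given_drone_num - 0).toNat 0 (by omega) rfl drones
    rw [h0] at hA
    rw [hA]
    have hidx := idx_loop (pathOf (PySem.List.pyGetD truck_path field [])
      (PySem.List.pyGetD truck_path (field + 1) []) remainder circles) given_drone_num drones []
    simp only [List.length_nil, Nat.cast_zero, List.nil_append] at hidx
    rw [hidx]
    by_cases hrc : remainder ≠ 0 ∧ 0 < circles
    · rw [paths_eq_pos _ _ _ _ _ hrc.1 hrc.2]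
      simp only [if_pos hrc, PySem.List.pyRepeat_singleton, List.length_append,
        List.length_replicate]
      congr 2
      omega
    · rw [paths_eq_neg _ _ _ _ _ (by omega) hrc]
      simp only [if_neg hrc, PySem.List.pyRepeat_singleton, List.length_append,
        List.length_replicate]
      congr 2
      omega
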